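-- pv_equiv track=rewrite | github.com/kevinnbass/TestMaster | organized_codebase/testing/flaky_test_detector.py | _is_periodic
-- ===== SOURCE A (Python) =====
-- from typing import Any, Dict, List, Optional, Tuple, Set
--
-- def _is_periodic(sequence: List[int], max_period: int = 10) -> bool:
--     """Check for periodic pattern"""
--     for period in range(2, min(max_period, len(sequence)//2)):
--         is_periodic = True
--         for i in range(period, len(sequence)):
--             if sequence[i] != sequence[i % period]:
--                 is_periodic = False
--                 break
--         if is_periodic:
--             return True
--     return False
-- ===== SOURCE B (Python) =====
-- def _is_periodic(sequence, max_period=10):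
--     """Check for periodic pattern by a single left-to-right sieve over the sequence:
--     keep the set of still-viable candidate periods, prune on each element, stop
--     early when none survive; periodic iff any candidate survives the whole pass."""
--     n = len(sequence)
--     candidates = list(range(2, min(max_period, n // 2)))
--     for i in range(2, n):
--         if not candidates:
--             return False
--         candidates = [p for p in candidates if sequence[i] == sequence[i % p]]
--     return bool(candidates)
-- ===== Notes on version B (the rewrite author's own statement) =====
-- stated objective: alternative
-- what changed: A scans the whole sequence once per candidate period (period-major nested loops with a flag and break, returning on the first period that fits); B transposes this into a single left-to-right pass over the sequence that maintains the shrinking set of surviving candidate periods, prunes it at each element and exits early only when it becomes empty, answering True iff any candidate survives; B trades A's early-success return for a single data pass, so it is slower on long sequences that are periodic.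
import Mathlib
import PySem

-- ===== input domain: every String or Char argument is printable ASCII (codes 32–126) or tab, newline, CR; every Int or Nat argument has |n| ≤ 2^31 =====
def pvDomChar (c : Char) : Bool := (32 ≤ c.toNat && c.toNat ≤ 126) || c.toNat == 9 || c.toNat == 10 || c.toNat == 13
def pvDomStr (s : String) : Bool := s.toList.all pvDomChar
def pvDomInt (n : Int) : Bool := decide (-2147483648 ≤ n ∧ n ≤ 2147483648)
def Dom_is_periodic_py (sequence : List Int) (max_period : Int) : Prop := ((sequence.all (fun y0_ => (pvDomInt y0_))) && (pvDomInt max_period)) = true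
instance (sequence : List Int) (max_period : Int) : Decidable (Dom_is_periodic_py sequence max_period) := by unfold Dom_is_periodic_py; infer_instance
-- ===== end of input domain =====

-- B replaces A's period-major nested scans by one left-to-right sieve pass over the
-- sequence that maintains the set of surviving candidate periods (objective: alternative).

-- ===== PORT A =====
-- inner loop 'for i in range(period, len(sequence)): if sequence[i] != sequence[i % period]: is_periodic = False; break'
def pvInnerA (seq : List Int) (period : Int) : List Int → Bool
  | [] => true
  | i :: rest =>
    if PySem.List.pyGetD seq i 0 ≠ PySem.List.pyGetD seq (PySem.Int.mod i period) 0 then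
      false           -- break: is_periodic = False
    else pvInnerA seq period rest

-- outer loop 'for period in range(...)' with early 'return True'
def pvOuterA (seq : List Int) : List Int → Bool
  | [] => false
  | p :: rest =>
    if pvInnerA seq p (PySem.List.pyRange p (seq.length : Int) 1) then true
    else pvOuterA seq rest

def is_periodic_py (sequence : List Int) (max_period : Int) : Bool :=
  pvOuterA sequence
    (PySem.List.pyRange 2 (min max_period (PySem.Int.floordiv (sequence.length : Int) 2)) 1)

-- ===== PORT B =====
-- 'for i in range(2, n): if not candidates: return False; candidates = [p for p in candidates if ...]'
def pvSieveB (seq : List Int) : List Int → List Int → Bool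
  | [], cands => !cands.isEmpty          -- return bool(candidates)
  | i :: rest, cands =>
    if cands.isEmpty then false          -- early 'return False'
    else
      pvSieveB seq rest
        (cands.filter (fun p =>
          PySem.List.pyGetD seq i 0 == PySem.List.pyGetD seq (PySem.Int.mod i p) 0))

def is_periodic_py_alt (sequence : List Int) (max_period : Int) : Bool :=
  pvSieveB sequence (PySem.List.pyRange 2 (sequence.length : Int) 1)
    (PySem.List.pyRange 2 (min max_period (PySem.Int.floordiv (sequence.length : Int) 2)) 1)

-- ===== PRECONDITION & SPEC =====
def Spec_is_periodic_py (sequence : List Int) (max_period : Int) (out : Bool) : Prop := out = is_periodic_py_alt sequence max_period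
instance (sequence : List Int) (max_period : Int) (out : Bool) : Decidable (Spec_is_periodic_py sequence max_period out) := by unfold Spec_is_periodic_py; infer_instance

-- ===== CLAIM (what is proved, stated in full; the proofs are below) =====
def Claim_equal_is_periodic_py : Prop := ∀ (sequence : List Int) (max_period : Int), Dom_is_periodic_py sequence max_period → Spec_is_periodic_py sequence max_period (is_periodic_py sequence max_period)

-- ===== LEMMAS AND PROOFS =====

-- A's inner flag-and-break loop is the pointwise modulo-tiling check over its index list.
theorem pvInnerA_eq_true_iff (seq : List Int) (period : Int) (l : List Int) :
    pvInnerA seq period l = true ↔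
      ∀ i ∈ l, PySem.List.pyGetD seq i 0 = PySem.List.pyGetD seq (PySem.Int.mod i period) 0 := by
  induction l with
  | nil => simp [pvInnerA]
  | cons i rest ih =>
    by_cases h : PySem.List.pyGetD seq i 0 = PySem.List.pyGetD seq (PySem.Int.mod i period) 0
    · simp [pvInnerA, h, ih]
    · simp [pvInnerA, h]

-- A's outer loop is an existence check over the candidate periods.
theorem pvOuterA_eq_true_iff (seq : List Int) (l : List Int) :
    pvOuterA seq l = true ↔
      ∃ p ∈ l, pvInnerA seq p (PySem.List.pyRange p (seq.length : Int) 1) = true := by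
  induction l with
  | nil => simp [pvOuterA]
  | cons p rest ih =>
    by_cases h : pvInnerA seq p (PySem.List.pyRange p (seq.length : Int) 1) = true
    · simp [pvOuterA, h]
    · simp [pvOuterA, h, ih]

-- B's sieve survives iff some candidate passes the check at every index of the pass.
theorem pvSieveB_eq_true_iff (seq : List Int) (is : List Int) (cands : List Int) :
    pvSieveB seq is cands = true ↔
      ∃ p ∈ cands, ∀ i ∈ is,
        PySem.List.pyGetD seq i 0 = PySem.List.pyGetD seq (PySem.Int.mod i p) 0 := by
  induction is generalizing cands with
  | nil =>
    cases cands with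
    | nil => simp [pvSieveB]
    | cons c cs => simp [pvSieveB]
  | cons i rest ih =>
    cases cands with
    | nil => simp [pvSieveB]
    | cons c cs =>
      rw [show pvSieveB seq (i :: rest) (c :: cs)
            = pvSieveB seq rest ((c :: cs).filter (fun p =>
                PySem.List.pyGetD seq i 0 == PySem.List.pyGetD seq (PySem.Int.mod i p) 0))
          from by simp [pvSieveB]]
      rw [ih]
      constructor
      · rintro ⟨p, hmem, hall⟩
        rw [List.mem_filter, beq_iff_eq] at hmem
        exact ⟨p, hmem.1, by
          intro j hj
          rcases List.mem_cons.mp hj with h | h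
          · exact h ▸ hmem.2
          · exact hall j h⟩
      · rintro ⟨p, hmem, hall⟩
        refine ⟨p, ?_, fun j hj => hall j (List.mem_cons_of_mem _ hj)⟩
        rw [List.mem_filter, beq_iff_eq]
        exact ⟨hmem, hall i List.mem_cons_self⟩

-- for 2 ≤ p, the check holds trivially on 2 ≤ i < p (there i % p = i), so the
-- index set [p, n) of A's check can be widened to B's pass range [2, n)
theorem range_widen (seq : List Int) (p : Int) (hp : 2 ≤ p) :
    (∀ i ∈ PySem.List.pyRange p (seq.length : Int) 1,
        PySem.List.pyGetD seq i 0 = PySem.List.pyGetD seq (PySem.Int.mod i p) 0) ↔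
    (∀ i ∈ PySem.List.pyRange 2 (seq.length : Int) 1,
        PySem.List.pyGetD seq i 0 = PySem.List.pyGetD seq (PySem.Int.mod i p) 0) := by
  constructor
  · intro h i hi
    rw [PySem.List.mem_pyRange_one] at hi
    by_cases hip : p ≤ i
    · exact h i (by rw [PySem.List.mem_pyRange_one]; omega)
    · have : PySem.Int.mod i p = i := by
        rw [PySem.Int.mod_eq_emod_of_pos (b := p) (by omega), Int.emod_eq_of_lt (by omega) (by omega)]
      rw [this]
  · intro h i hi
    rw [PySem.List.mem_pyRange_one] at hi
    exact h i (by rw [PySem.List.mem_pyRange_one]; omega)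

-- ===== VERDICT (by name: the statement is the Claim_ definition above) =====
theorem is_periodic_py_spec : Claim_equal_is_periodic_py := by
  intro sequence max_period _
  unfold Spec_is_periodic_py is_periodic_py is_periodic_py_alt
  rw [Bool.eq_iff_iff, pvOuterA_eq_true_iff, pvSieveB_eq_true_iff]
  constructor
  · rintro ⟨p, hmem, hinner⟩
    have hp : 2 ≤ p := by
      have := PySem.List.mem_pyRange_one.mp hmem; omega
    exact ⟨p, hmem, (range_widen sequence p hp).mp ((pvInnerA_eq_true_iff _ _ _).mp hinner)⟩
  · rintro ⟨p, hmem, hall⟩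
    have hp : 2 ≤ p := by
      have := PySem.List.mem_pyRange_one.mp hmem; omega
    exact ⟨p, hmem, (pvInnerA_eq_true_iff _ _ _).mpr ((range_widen sequence p hp).mpr hall)⟩
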